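-- pv_equiv track=rewrite | github.com/Drastansh7/Python | hw5.py | topirate
-- ===== SOURCE A (Python) =====
-- def topirate(string):
--     greetings = {'hello':'avast','excuse': 'arr'}
--     people =  {'sir': 'matey', 'boy': 'matey', 'man': 'matey', 'madam': 'proud beauty', 'officer': 'foul blaggard', 'friends' : 'hearties', 'daredevil' : 'swashbuckler', 'pirate flag': 'black jack'}
--     articles = {'the':"th'", 'my': 'me', 'your': 'yer','is':'be','are': 'be', 'this': "this 'ere"}
--     places = {'restroom':'head', 'restaurant' : 'galley', 'hotel': 'fleabag inn', 'ocean':'briney deep'}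
--
--     words = string.split()
--     pirate_string = ''
--     for word in words:
--         if word in greetings:
--             pirate_string += greetings[word] + ' '
--         elif word in people:
--             pirate_string += people[word] + ' '
--         elif word in articles:
--             pirate_string += articles[word] + ' '
--         elif word in places:
--             pirate_string += places[word] + ' '
--         else:
--             pirate_string += word + ' '
--     return pirate_string
-- ===== SOURCE B (Python) =====
-- def topirate(string):
--     entries = [
--         ('hello', 'avast'), ('excuse', 'arr'),
--         ('sir', 'matey'), ('boy', 'matey'), ('man', 'matey'),
--         ('madam', 'proud beauty'), ('officer', 'foul blaggard'),
--         ('friends', 'hearties'), ('daredevil', 'swashbuckler'),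
--         ('pirate flag', 'black jack'),
--         ('the', "th'"), ('my', 'me'), ('your', 'yer'),
--         ('is', 'be'), ('are', 'be'), ('this', "this 'ere"),
--         ('restroom', 'head'), ('restaurant', 'galley'),
--         ('hotel', 'fleabag inn'), ('ocean', 'briney deep'),
--     ]
--     # Staged rewriting: one whole-list substitution pass per translation entry.
--     # Correct because the source keys are pairwise distinct and no replacement
--     # value is itself a key, so passes never interfere.
--     words = string.split()
--     for src, dst in entries:
--         words = [dst if w == src else w for w in words]
--     return ''.join(w + ' ' for w in words)
-- ===== Notes on version B (the rewrite author's own statement) =====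
-- stated objective: alternative
-- what changed: B performs one whole-list substitution pass per translation entry (20 staged rewrites of the split word list, like repeated search-and-replace), then joins with trailing spaces, instead of A's single pass with a four-way dict-membership elif cascade per word; this is correct because the keys are pairwise distinct and no replacement value is itself a key, so the passes never interfere.
import Mathlib
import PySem

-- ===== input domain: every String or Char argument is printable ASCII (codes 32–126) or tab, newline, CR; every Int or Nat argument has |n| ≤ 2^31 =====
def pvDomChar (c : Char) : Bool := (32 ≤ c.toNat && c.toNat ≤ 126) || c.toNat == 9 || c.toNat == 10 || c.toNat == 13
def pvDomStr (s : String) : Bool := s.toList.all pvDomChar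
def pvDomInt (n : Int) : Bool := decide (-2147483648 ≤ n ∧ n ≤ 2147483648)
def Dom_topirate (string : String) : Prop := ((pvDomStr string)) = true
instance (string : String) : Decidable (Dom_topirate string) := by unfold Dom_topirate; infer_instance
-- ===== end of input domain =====

-- B rewrites the split word list with one whole-list substitution pass per translation
-- entry (20 staged passes) and then joins, replacing A's single pass with a four-way
-- dict-membership elif cascade per word (objective: alternative; not claimed faster).


-- ===== PORT A =====
def pvGreetings : PySem.Dict String String :=
  PySem.Dict.ofList [("hello", "avast"), ("excuse", "arr")]
def pvPeople : PySem.Dict String String :=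
  PySem.Dict.ofList [("sir", "matey"), ("boy", "matey"), ("man", "matey"),
    ("madam", "proud beauty"), ("officer", "foul blaggard"), ("friends", "hearties"),
    ("daredevil", "swashbuckler"), ("pirate flag", "black jack")]
def pvArticles : PySem.Dict String String :=
  PySem.Dict.ofList [("the", "th'"), ("my", "me"), ("your", "yer"),
    ("is", "be"), ("are", "be"), ("this", "this 'ere")]
def pvPlaces : PySem.Dict String String :=
  PySem.Dict.ofList [("restroom", "head"), ("restaurant", "galley"),
    ("hotel", "fleabag inn"), ("ocean", "briney deep")]

def topirate (string : String) : String :=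
  let words := PySem.Str.split₀ string
  words.foldl (fun pirate_string word =>
    if pvGreetings.contains word then pirate_string ++ (pvGreetings.getD word "" ++ " ")
    else if pvPeople.contains word then pirate_string ++ (pvPeople.getD word "" ++ " ")
    else if pvArticles.contains word then pirate_string ++ (pvArticles.getD word "" ++ " ")
    else if pvPlaces.contains word then pirate_string ++ (pvPlaces.getD word "" ++ " ")
    else pirate_string ++ (word ++ " ")) ""

-- ===== PORT B =====
-- the entries list of Source B, in order
def pvEntries : List (String × String) :=
  [("hello", "avast"), ("excuse", "arr"),
   ("sir", "matey"), ("boy", "matey"), ("man", "matey"),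
   ("madam", "proud beauty"), ("officer", "foul blaggard"),
   ("friends", "hearties"), ("daredevil", "swashbuckler"),
   ("pirate flag", "black jack"),
   ("the", "th'"), ("my", "me"), ("your", "yer"),
   ("is", "be"), ("are", "be"), ("this", "this 'ere"),
   ("restroom", "head"), ("restaurant", "galley"),
   ("hotel", "fleabag inn"), ("ocean", "briney deep")]

def topirate_alt (string : String) : String :=
  let words := pvEntries.foldl
    (fun ws kv => ws.map (fun w => if w == kv.1 then kv.2 else w))
    (PySem.Str.split₀ string)
  PySem.Str.join "" (words.map (fun w => w ++ " "))

-- ===== PRECONDITION & SPEC =====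
def Spec_topirate (string : String) (out : String) : Prop := out = topirate_alt string
instance (string : String) (out : String) : Decidable (Spec_topirate string out) := by unfold Spec_topirate; infer_instance

-- ===== CLAIM (what is proved, stated in full; the proofs are below) =====
def Claim_equal_topirate : Prop := ∀ (string : String), Dom_topirate string → Spec_topirate string (topirate string)

-- ===== LEMMAS AND PROOFS =====

-- the effect of all of B's substitution passes on one word
def pvSub (w : String) : String :=
  pvEntries.foldl (fun a kv => if a == kv.1 then kv.2 else a) w

-- folding whole-list substitution passes = substituting pointwise in each word
theorem pv_foldl_map_comm (es : List (String × String)) (ws : List String) :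
    es.foldl (fun ws kv => ws.map (fun w => if w == kv.1 then kv.2 else w)) ws
      = ws.map (fun w => es.foldl (fun a kv => if a == kv.1 then kv.2 else a) w) := by
  induction es generalizing ws with
  | nil => simp
  | cons kv rest ih =>
    simp only [List.foldl_cons, ih, List.map_map]
    rfl

-- B's pointwise substitution agrees with A's four-way cascade on every word
theorem pv_word_eq (w : String) :
    (if pvGreetings.contains w then pvGreetings.getD w ""
     else if pvPeople.contains w then pvPeople.getD w ""
     else if pvArticles.contains w then pvArticles.getD w ""
     else if pvPlaces.contains w then pvPlaces.getD w ""
     else w) = pvSub w := by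
  by_cases h1 : w = "hello"
  · subst h1; decide
  by_cases h2 : w = "excuse"
  · subst h2; decide
  by_cases h3 : w = "sir"
  · subst h3; decide
  by_cases h4 : w = "boy"
  · subst h4; decide
  by_cases h5 : w = "man"
  · subst h5; decide
  by_cases h6 : w = "madam"
  · subst h6; decide
  by_cases h7 : w = "officer"
  · subst h7; decide
  by_cases h8 : w = "friends"
  · subst h8; decide
  by_cases h9 : w = "daredevil"
  · subst h9; decide
  by_cases h10 : w = "pirate flag"
  · subst h10; decide
  by_cases h11 : w = "the"
  · subst h11; decide
  by_cases h12 : w = "my"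
  · subst h12; decide
  by_cases h13 : w = "your"
  · subst h13; decide
  by_cases h14 : w = "is"
  · subst h14; decide
  by_cases h15 : w = "are"
  · subst h15; decide
  by_cases h16 : w = "this"
  · subst h16; decide
  by_cases h17 : w = "restroom"
  · subst h17; decide
  by_cases h18 : w = "restaurant"
  · subst h18; decide
  by_cases h19 : w = "hotel"
  · subst h19; decide
  by_cases h20 : w = "ocean"
  · subst h20; decide
  simp [pvSub, pvEntries, pvGreetings, pvPeople, pvArticles, pvPlaces,
    PySem.Dict.contains, PySem.Dict.ofList,
    PySem.Dict.update, PySem.Dict.empty, PySem.Dict.insert,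
    beq_iff_eq, h1, h2, h3, h4, h5, h6, h7, h8, h9, h10,
    h11, h12, h13, h14, h15, h16, h17, h18, h19, h20,
    Ne.symm h1, Ne.symm h2, Ne.symm h3, Ne.symm h4, Ne.symm h5, Ne.symm h6,
    Ne.symm h7, Ne.symm h8, Ne.symm h9, Ne.symm h10, Ne.symm h11, Ne.symm h12,
    Ne.symm h13, Ne.symm h14, Ne.symm h15, Ne.symm h16, Ne.symm h17, Ne.symm h18,
    Ne.symm h19, Ne.symm h20]

theorem pv_join_empty_cons (x : String) (xs : List String) :
    PySem.Str.join "" (x :: xs) = x ++ PySem.Str.join "" xs := by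
  cases xs with
  | nil => apply String.ext; simp [PySem.Str.join, PySem.Chars.join, List.intercalate]
  | cons y ys => apply String.ext; simp [PySem.Str.join, PySem.Chars.join_cons_cons]

theorem pv_foldl_append_join (f : String → String) (ws : List String) (s : String) :
    ws.foldl (fun acc w => acc ++ f w) s = s ++ PySem.Str.join "" (ws.map f) := by
  induction ws generalizing s with
  | nil => apply String.ext; simp [PySem.Str.join, PySem.Chars.join, List.intercalate]
  | cons w ws ih =>
    simp only [List.foldl_cons, List.map_cons, pv_join_empty_cons, ih,
      String.append_assoc]

-- ===== VERDICT (by name: the statement is the Claim_ definition above) =====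
theorem topirate_spec : Claim_equal_topirate := by
  intro s _
  unfold Spec_topirate topirate topirate_alt
  have hstep : ∀ (acc w : String),
      (if pvGreetings.contains w then acc ++ (pvGreetings.getD w "" ++ " ")
       else if pvPeople.contains w then acc ++ (pvPeople.getD w "" ++ " ")
       else if pvArticles.contains w then acc ++ (pvArticles.getD w "" ++ " ")
       else if pvPlaces.contains w then acc ++ (pvPlaces.getD w "" ++ " ")
       else acc ++ (w ++ " ")) = acc ++ (pvSub w ++ " ") := by
    intro acc w
    rw [← pv_word_eq w]
    split_ifs <;> rfl
  have hcong : (PySem.Str.split₀ s).foldl (fun pirate_string word =>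
        if pvGreetings.contains word then pirate_string ++ (pvGreetings.getD word "" ++ " ")
        else if pvPeople.contains word then pirate_string ++ (pvPeople.getD word "" ++ " ")
        else if pvArticles.contains word then pirate_string ++ (pvArticles.getD word "" ++ " ")
        else if pvPlaces.contains word then pirate_string ++ (pvPlaces.getD word "" ++ " ")
        else pirate_string ++ (word ++ " ")) ""
      = (PySem.Str.split₀ s).foldl (fun acc w => acc ++ (pvSub w ++ " ")) "" := by
    apply List.foldl_ext; intro acc w _; exact hstep acc w
  rw [hcong, pv_foldl_append_join (fun w => pvSub w ++ " ")]
  simp only [pv_foldl_map_comm, List.map_map]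
  apply String.ext; simp [pvSub, Function.comp_def]
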